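-- pv_equiv track=rewrite | github.com/Amaregoud/Amar | commonsubsequence.py | count_common_sequence
-- ===== SOURCE A (Python) =====
-- def count_common_sequence(X,Y):
--     m, n=len(X),len(Y)
--     dp=[[0] * (n+1) for _ in range(m+1)]
--     for i in range(1,m+1):
--         for j in range(1,n+1):
--             if X[i-1]==Y[j-1]:
--                 dp[i][j]=1 + dp[i-1][j] + dp[i][j-1]
--             else:
--                 dp[i][j] = dp[i - 1][j] + dp[i][j - 1] - dp[i - 1][j - 1]
--     return dp[m][n]
-- ===== SOURCE B (Python) =====
-- def count_common_sequence(X, Y):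
--     # Top-down memoized recursion: f(i, j) = count for prefixes X[:i], Y[:j],
--     # computed on demand from (m, n) instead of filling a bottom-up table.
--     m, n = len(X), len(Y)
--     memo = {}
--
--     def f(i, j):
--         if i == 0 or j == 0:
--             return 0
--         key = (i, j)
--         if key in memo:
--             return memo[key]
--         if X[i - 1] == Y[j - 1]:
--             r = 1 + f(i - 1, j) + f(i, j - 1)
--         else:
--             r = f(i - 1, j) + f(i, j - 1) - f(i - 1, j - 1)
--         memo[key] = r
--         return r
--
--     return f(m, n)
-- ===== Notes on version B (the rewrite author's own statement) =====
-- stated objective: alternative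
-- what changed: Replaces A's bottom-up (m+1)x(n+1) DP table filled by nested range loops with a top-down recursive helper f(i,j) memoized in a dict, visiting states on demand from (m,n).
import Mathlib
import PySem

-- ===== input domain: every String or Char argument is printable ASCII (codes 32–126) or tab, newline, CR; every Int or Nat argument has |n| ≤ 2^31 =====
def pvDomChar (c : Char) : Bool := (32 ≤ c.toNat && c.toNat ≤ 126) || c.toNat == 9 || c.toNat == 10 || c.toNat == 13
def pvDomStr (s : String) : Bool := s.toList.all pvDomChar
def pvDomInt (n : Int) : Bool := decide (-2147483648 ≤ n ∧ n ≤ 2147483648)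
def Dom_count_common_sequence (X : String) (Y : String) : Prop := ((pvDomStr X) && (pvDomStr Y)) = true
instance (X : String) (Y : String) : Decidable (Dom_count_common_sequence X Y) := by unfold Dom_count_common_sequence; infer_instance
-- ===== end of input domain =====

-- B replaces A's bottom-up (m+1)×(n+1) DP table filled by nested range loops with a
-- top-down memoized recursive helper f(i,j) evaluated on demand from (m,n).

-- ===== PORT A =====
-- dp[i][j] read/write helpers (indices are always in range in A's loops, so the defaults are never used)
def a_get (dp : List (List Int)) (i j : Int) : Int :=
  PySem.List.pyGetD (PySem.List.pyGetD dp i []) j 0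

def a_set (dp : List (List Int)) (i j : Int) (v : Int) : List (List Int) :=
  PySem.List.pySetD dp i (PySem.List.pySetD (PySem.List.pyGetD dp i []) j v)

def count_common_sequence (X : String) (Y : String) : Int :=
  let xs := X.toList
  let ys := Y.toList
  let m : Int := xs.length
  let n : Int := ys.length
  let dp0 : List (List Int) :=
    (PySem.List.pyRange 0 (m+1) 1).map (fun _ => List.replicate (n+1).toNat (0:Int))
  let dp := (PySem.List.pyRange 1 (m+1) 1).foldl (fun dp i =>
    (PySem.List.pyRange 1 (n+1) 1).foldl (fun dp j =>
      if PySem.List.pyGetD xs (i-1) ' ' = PySem.List.pyGetD ys (j-1) ' ' then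
        a_set dp i j (1 + a_get dp (i-1) j + a_get dp i (j-1))
      else
        a_set dp i j (a_get dp (i-1) j + a_get dp i (j-1) - a_get dp (i-1) (j-1))) dp) dp0
  a_get dp m n

-- ===== PORT B =====
-- Source B's inner f(i,j), as structural recursion on (i,j); the memo dict is a pure
-- cache and does not change any returned value, so it has no counterpart here.
-- Matching the recursion: i+1,j+1 stand for Python's i,j ≥ 1, so f(i-1,j) is
-- fB i (j+1) and f(i,j-1) is fB (i+1) j; X[i-1] is xs.getD i (always in range).
def fB (xs ys : List Char) : Nat → Nat → Int
  | 0, _ => 0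
  | _+1, 0 => 0
  | i+1, j+1 =>
      if xs.getD i ' ' = ys.getD j ' ' then
        1 + fB xs ys i (j+1) + fB xs ys (i+1) j
      else
        fB xs ys i (j+1) + fB xs ys (i+1) j - fB xs ys i j
termination_by i j => (i, j)

def count_common_sequence_alt (X : String) (Y : String) : Int :=
  fB X.toList Y.toList X.toList.length Y.toList.length

-- ===== PRECONDITION & SPEC =====
def Spec_count_common_sequence (X : String) (Y : String) (out : Int) : Prop := out = count_common_sequence_alt X Y
instance (X : String) (Y : String) (out : Int) : Decidable (Spec_count_common_sequence X Y out) := by unfold Spec_count_common_sequence; infer_instance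

-- ===== CLAIM (what is proved, stated in full; the proofs are below) =====
def Claim_equal_count_common_sequence : Prop := ∀ (X : String) (Y : String), Dom_count_common_sequence X Y → Spec_count_common_sequence X Y (count_common_sequence X Y)

-- ===== LEMMAS AND PROOFS =====

theorem fB_zero_left (xs ys : List Char) (j : Nat) : fB xs ys 0 j = 0 := by
  cases j <;> simp [fB]

theorem fB_zero_right (xs ys : List Char) (i : Nat) : fB xs ys i 0 = 0 := by
  cases i <;> simp [fB]

-- A's table after finishing row i, column j: entry (a,b) holds fB a b iff the cell has been written (or is an untouched zero row/column)
def Tab (xs ys : List Char) (i j : Nat) : List (List Int) :=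
  (List.range (xs.length + 1)).map (fun a =>
    (List.range (ys.length + 1)).map (fun b =>
      if a < i ∨ (a = i ∧ b ≤ j) then fB xs ys a b else 0))

theorem tab_getD (xs ys : List Char) (i j a : Nat) (ha : a ≤ xs.length) :
    (Tab xs ys i j).getD a [] =
      (List.range (ys.length + 1)).map (fun b =>
        if a < i ∨ (a = i ∧ b ≤ j) then fB xs ys a b else 0) := by
  rw [Tab, List.getD_eq_getElem _ _ (by simp; omega)]
  simp

theorem tab_get (xs ys : List Char) (i j a b : Nat) (ha : a ≤ xs.length) (hb : b ≤ ys.length) :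
    a_get (Tab xs ys i j) (↑a) (↑b) =
      if a < i ∨ (a = i ∧ b ≤ j) then fB xs ys a b else 0 := by
  rw [a_get]
  simp only [PySem.List.pyGetD_natCast]
  rw [tab_getD xs ys i j a ha, List.getD_eq_getElem _ _ (by simp; omega)]
  simp

theorem tab_set (xs ys : List Char) (i j : Nat) (hi : i + 1 ≤ xs.length) (hj : j + 1 ≤ ys.length) :
    (Tab xs ys (i+1) j).set (i+1)
      (((Tab xs ys (i+1) j).getD (i+1) []).set (j+1) (fB xs ys (i+1) (j+1)))
    = Tab xs ys (i+1) (j+1) := by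
  rw [tab_getD xs ys (i+1) j (i+1) (by omega)]
  apply List.ext_getElem
  · simp [Tab]
  · intro a h1 h2
    rw [List.getElem_set]
    simp only [Tab, List.length_set, List.length_map, List.length_range] at h1 h2
    by_cases hai : i + 1 = a
    · subst hai
      rw [if_pos rfl]
      simp only [Tab, List.getElem_map, List.getElem_range]
      apply List.ext_getElem
      · simp
      · intro b hb1 hb2
        rw [List.getElem_set]
        simp only [List.length_set, List.length_map, List.length_range] at hb1 hb2
        by_cases hbj : j + 1 = b
        · subst hbj
          rw [if_pos rfl]
          simp only [List.getElem_map, List.getElem_range]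
          simp
        · rw [if_neg hbj]
          simp only [List.getElem_map, List.getElem_range]
          simp only [lt_irrefl, true_and, false_or]
          split_ifs <;> first | rfl | omega
    · rw [if_neg hai]
      simp only [Tab, List.getElem_map, List.getElem_range]
      apply List.map_congr_left
      intro b _
      split_ifs <;> first | rfl | omega

theorem dp0_eq_tab (xs ys : List Char) :
    (PySem.List.pyRange 0 (((xs.length : Int))+1) 1).map
      (fun _ => List.replicate ((((ys.length : Int)))+1).toNat (0:Int)) = Tab xs ys 0 0 := by
  have hm : (((xs.length : Int)) + 1) = ((xs.length + 1 : Nat) : Int) := by push_cast; ring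
  have hn : ((((ys.length : Int))) + 1).toNat = ys.length + 1 := by omega
  rw [hm, hn, PySem.List.pyRange_zero_nat]
  apply List.ext_getElem
  · simp [Tab]
  · intro a h1 h2
    simp only [Tab, List.getElem_map, List.getElem_range]
    apply List.ext_getElem
    · simp
    · intro b hb1 hb2
      simp only [List.getElem_replicate, List.getElem_map, List.getElem_range]
      split_ifs with hc
      · rcases hc with hc | ⟨hc1, hc2⟩
        · omega
        · subst hc1
          interval_cases b <;> simp [fB_zero_left]
      · rfl

theorem tab_shift (xs ys : List Char) (r : Nat) :
    Tab xs ys r ys.length = Tab xs ys (r+1) 0 := by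
  apply List.ext_getElem
  · simp [Tab]
  · intro a h1 h2
    simp only [Tab, List.getElem_map, List.getElem_range]
    apply List.map_congr_left
    intro b hb
    simp only [List.mem_range] at hb
    split_ifs
    · rfl
    · omega
    · have hb0 : b = 0 := by omega
      rw [hb0, fB_zero_right]
    · rfl

theorem a_cell_step (xs ys : List Char) (i t : Nat) (hi : i < xs.length) (ht : t < ys.length) :
    (if PySem.List.pyGetD xs ((↑(i+1):Int)-1) ' ' = PySem.List.pyGetD ys (((t:Int)+1)-1) ' ' then
        a_set (Tab xs ys (i+1) t) (↑(i+1)) ((t:Int)+1)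
          (1 + a_get (Tab xs ys (i+1) t) ((↑(i+1):Int)-1) ((t:Int)+1)
             + a_get (Tab xs ys (i+1) t) (↑(i+1)) (((t:Int)+1)-1))
      else
        a_set (Tab xs ys (i+1) t) (↑(i+1)) ((t:Int)+1)
          (a_get (Tab xs ys (i+1) t) ((↑(i+1):Int)-1) ((t:Int)+1)
            + a_get (Tab xs ys (i+1) t) (↑(i+1)) (((t:Int)+1)-1)
            - a_get (Tab xs ys (i+1) t) ((↑(i+1):Int)-1) (((t:Int)+1)-1)))
    = Tab xs ys (i+1) (t+1) := by
  have e1 : ((↑(i+1):Int)-1) = ((i : Nat) : Int) := by push_cast; ring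
  have e2 : (((t:Int)+1)-1) = ((t : Nat) : Int) := by push_cast; ring
  have e3 : ((t:Int)+1) = (((t+1 : Nat)) : Int) := by push_cast; ring
  have g1 : a_get (Tab xs ys (i+1) t) ((i:Nat):Int) (((t+1:Nat):Int)) = fB xs ys i (t+1) := by
    rw [tab_get xs ys (i+1) t i (t+1) (by omega) (by omega)]
    exact if_pos (by omega)
  have g2 : a_get (Tab xs ys (i+1) t) (((i+1:Nat):Int)) (((t:Nat):Int)) = fB xs ys (i+1) t := by
    rw [tab_get xs ys (i+1) t (i+1) t (by omega) (by omega)]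
    exact if_pos (by omega)
  have g3 : a_get (Tab xs ys (i+1) t) ((i:Nat):Int) (((t:Nat):Int)) = fB xs ys i t := by
    rw [tab_get xs ys (i+1) t i t (by omega) (by omega)]
    exact if_pos (by omega)
  rw [e1, e2, e3, g1, g2, g3]
  simp only [PySem.List.pyGetD_natCast]
  have hrec : fB xs ys (i+1) (t+1) =
      if xs.getD i ' ' = ys.getD t ' ' then 1 + fB xs ys i (t+1) + fB xs ys (i+1) t
      else fB xs ys i (t+1) + fB xs ys (i+1) t - fB xs ys i t := by
    simp [fB]
  have hset : ∀ v, a_set (Tab xs ys (i+1) t) (↑(i+1)) (↑(t+1)) v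
      = (Tab xs ys (i+1) t).set (i+1) (((Tab xs ys (i+1) t).getD (i+1) []).set (t+1) v) := by
    intro v
    rw [a_set]
    simp only [PySem.List.pyGetD_natCast, PySem.List.pySetD_natCast]
  split_ifs with hc
  · rw [hset, ← tab_set xs ys i t (by omega) (by omega)]
    congr 2
    rw [hrec, if_pos hc]
  · rw [hset, ← tab_set xs ys i t (by omega) (by omega)]
    congr 2
    rw [hrec, if_neg hc]

theorem a_inner (xs ys : List Char) (r : Nat) (hr : r < xs.length) : ∀ t, t ≤ ys.length →
    (PySem.List.pyRange 1 ((t:Int)+1) 1).foldl (fun dp j =>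
      if PySem.List.pyGetD xs ((↑(r+1):Int)-1) ' ' = PySem.List.pyGetD ys (j-1) ' ' then
        a_set dp ↑(r+1) j (1 + a_get dp ((↑(r+1):Int)-1) j + a_get dp ↑(r+1) (j-1))
      else
        a_set dp ↑(r+1) j
          (a_get dp ((↑(r+1):Int)-1) j + a_get dp ↑(r+1) (j-1) - a_get dp ((↑(r+1):Int)-1) (j-1)))
      (Tab xs ys (r+1) 0) = Tab xs ys (r+1) t := by
  intro t
  induction t with
  | zero =>
      intro _
      rw [show ((0:Nat):Int)+1 = 1 by norm_num, PySem.List.pyRange_one_eq_nil (le_refl 1)]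
      rfl
  | succ t ih =>
      intro ht
      have e : ((t+1:Nat):Int)+1 = ((t:Int)+1)+1 := by push_cast; ring
      rw [e, PySem.List.pyRange_one_succ_right (by omega), List.foldl_append, ih (by omega)]
      simp only [List.foldl_cons, List.foldl_nil]
      exact a_cell_step xs ys r t hr (by omega)

theorem tab_zero (xs ys : List Char) : Tab xs ys 0 ys.length = Tab xs ys 0 0 := by
  apply List.ext_getElem
  · simp [Tab]
  · intro a h1 h2
    simp only [Tab, List.getElem_map, List.getElem_range]
    apply List.map_congr_left
    intro b hb
    simp only [List.mem_range] at hb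
    split_ifs
    · rfl
    · have : a = 0 := by omega
      subst this
      rw [fB_zero_left]
    · omega
    · rfl

theorem a_outer (xs ys : List Char) : ∀ r, r ≤ xs.length →
    (PySem.List.pyRange 1 ((r:Int)+1) 1).foldl (fun dp i =>
      (PySem.List.pyRange 1 ((ys.length:Int)+1) 1).foldl (fun dp j =>
        if PySem.List.pyGetD xs (i-1) ' ' = PySem.List.pyGetD ys (j-1) ' ' then
          a_set dp i j (1 + a_get dp (i-1) j + a_get dp i (j-1))
        else
          a_set dp i j (a_get dp (i-1) j + a_get dp i (j-1) - a_get dp (i-1) (j-1))) dp)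
      (Tab xs ys 0 0) = Tab xs ys r ys.length := by
  intro r
  induction r with
  | zero =>
      intro _
      rw [show ((0:Nat):Int)+1 = 1 by norm_num, PySem.List.pyRange_one_eq_nil (le_refl 1)]
      rw [List.foldl_nil, tab_zero]
  | succ r ih =>
      intro hr
      have e : ((r+1:Nat):Int)+1 = ((r:Int)+1)+1 := by push_cast; ring
      rw [e, PySem.List.pyRange_one_succ_right (a:=1) (b:=(r:Int)+1) (by omega),
        List.foldl_append, ih (by omega)]
      simp only [List.foldl_cons, List.foldl_nil]
      have e2 : ((r:Int)+1) = ((r+1:Nat):Int) := by push_cast; ring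
      rw [e2, tab_shift xs ys r]
      exact a_inner xs ys r (by omega) ys.length (le_refl _)

theorem a_eq_fB (X Y : String) :
    count_common_sequence X Y = fB X.toList Y.toList X.toList.length Y.toList.length := by
  show a_get ((PySem.List.pyRange 1 ((X.toList.length:Int)+1) 1).foldl _
      ((PySem.List.pyRange 0 ((X.toList.length:Int)+1) 1).map
        (fun _ => List.replicate (((Y.toList.length:Int))+1).toNat (0:Int)))) _ _ = _
  rw [dp0_eq_tab, a_outer X.toList Y.toList X.toList.length (le_refl _)]
  rw [tab_get X.toList Y.toList X.toList.length Y.toList.length X.toList.length Y.toList.length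
      (le_refl _) (le_refl _)]
  exact if_pos (by omega)

-- ===== VERDICT (by name: the statement is the Claim_ definition above) =====
theorem count_common_sequence_spec : Claim_equal_count_common_sequence := by
  intro X Y _
  unfold Spec_count_common_sequence count_common_sequence_alt
  rw [a_eq_fB]
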